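-- pv_equiv track=rewrite | github.com/Rupesh-Max-na-Ore/Competitive-Programming | CSES/Dynamic Programming/q9_Counting_Towers/solve3.py | solve
-- ===== SOURCE A (Python) =====
-- MOD = 10**9 + 7
--
-- def solve(n):
--     dp = [[0, 0] for _ in range(n + 2)]
--     dp[1][0] = 1  # Fully filled tower of height 1
--     dp[1][1] = 1  # Partial fill (gap)
--
--     for i in range(2, n + 1):
--         dp[i][0] = (dp[i - 1][0] * 4 + dp[i - 1][1]) % MOD
--         dp[i][1] = (dp[i - 1][0] + dp[i - 1][1] * 2) % MOD
--
--     return (dp[n][0] + dp[n][1]) % MOD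
-- ===== SOURCE B (Python) =====
-- MOD = 10**9 + 7
--
-- def solve(n):
--     # Count towers of height n: answer = (1 1) * [[4,1],[1,2]]^(n-1) * (1 1)^T mod p,
--     # computed by fast matrix exponentiation in O(log n).
--     if n <= 0:
--         return 0
--     def mul(X, Y):
--         return ((X[0] * Y[0] + X[1] * Y[2]) % MOD,
--                 (X[0] * Y[1] + X[1] * Y[3]) % MOD,
--                 (X[2] * Y[0] + X[3] * Y[2]) % MOD,
--                 (X[2] * Y[1] + X[3] * Y[3]) % MOD)
--     r = (1, 0, 0, 1)
--     p = (4, 1, 1, 2)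
--     e = n - 1
--     while e:
--         if e & 1:
--             r = mul(r, p)
--         p = mul(p, p)
--         e >>= 1
--     return (r[0] + r[1] + r[2] + r[3]) % MOD
-- ===== Notes on version B (the rewrite author's own statement) =====
-- stated objective: faster
-- what changed: Replaces the O(n) DP table over heights by O(log n) binary exponentiation of the 2x2 transition matrix [[4,1],[1,2]] mod 10^9+7.
import Mathlib
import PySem

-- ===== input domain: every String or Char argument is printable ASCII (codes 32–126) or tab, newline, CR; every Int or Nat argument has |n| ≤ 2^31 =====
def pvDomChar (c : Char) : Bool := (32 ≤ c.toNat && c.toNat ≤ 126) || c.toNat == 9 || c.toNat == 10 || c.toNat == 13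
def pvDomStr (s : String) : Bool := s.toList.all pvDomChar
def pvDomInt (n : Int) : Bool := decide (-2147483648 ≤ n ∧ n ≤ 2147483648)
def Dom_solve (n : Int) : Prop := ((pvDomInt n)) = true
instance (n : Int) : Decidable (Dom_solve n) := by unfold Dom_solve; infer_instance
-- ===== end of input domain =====

-- B replaces A's O(n) DP-table loop by binary exponentiation of the 2x2 transition matrix mod 10^9+7 (measured faster; asymptotic change).


-- ===== PORT A =====
-- loop body: dp[i][0] = (dp[i-1][0]*4 + dp[i-1][1]) % MOD; dp[i][1] = (dp[i-1][0] + dp[i-1][1]*2) % MOD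
-- (both assignments read only dp[i-1], which neither write touches, so they are one set of dp[i])
def solveStep (dp : List (Int × Int)) (i : Int) : List (Int × Int) :=
  let prev := PySem.List.pyGetD dp (i - 1) (0, 0)
  PySem.List.pySetD dp i
    (PySem.Int.mod (prev.1 * 4 + prev.2) 1000000007,
     PySem.Int.mod (prev.1 + prev.2 * 2) 1000000007)

def solve (n : Int) : Int :=
  let dp0 : List (Int × Int) := (PySem.List.pyRange 0 (n + 2) 1).map (fun _ => (0, 0))
  match PySem.List.pySet? dp0 1 (1, 1) with   -- dp[1][0] = 1; dp[1][1] = 1 (IndexError exactly when n < 0)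
  | none => 0
  | some dp1 =>
    let dp := (PySem.List.pyRange 2 (n + 1) 1).foldl solveStep dp1
    let last := PySem.List.pyGetD dp n (0, 0)
    PySem.Int.mod (last.1 + last.2) 1000000007

-- ===== PORT B =====
def mulM (X Y : Int × Int × Int × Int) : Int × Int × Int × Int :=
  (PySem.Int.mod (X.1 * Y.1 + X.2.1 * Y.2.2.1) 1000000007,
   PySem.Int.mod (X.1 * Y.2.1 + X.2.1 * Y.2.2.2) 1000000007,
   PySem.Int.mod (X.2.2.1 * Y.1 + X.2.2.2 * Y.2.2.1) 1000000007,
   PySem.Int.mod (X.2.2.1 * Y.2.1 + X.2.2.2 * Y.2.2.2) 1000000007)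

def powLoop (e : Nat) (r p : Int × Int × Int × Int) : Int × Int × Int × Int :=
  if e = 0 then r
  else powLoop (e / 2) (if e % 2 = 1 then mulM r p else r) (mulM p p)
decreasing_by omega

def solve_alt (n : Int) : Int :=
  if n ≤ 0 then 0
  else
    let r := powLoop (n - 1).toNat (1, 0, 0, 1) (4, 1, 1, 2)
    PySem.Int.mod (r.1 + r.2.1 + r.2.2.1 + r.2.2.2) 1000000007

-- ===== PRECONDITION & SPEC =====
-- Pre_ excludes only n < 0, where Python A raises IndexError (dp then has fewer than 2 rows, so the write dp[1] fails).
def Pre_solve (n : Int) : Prop := 0 ≤ n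
instance (n : Int) : Decidable (Pre_solve n) := by unfold Pre_solve; infer_instance
def pvWitness_solve : Int := 3

def Spec_solve (n : Int) (out : Int) : Prop := out = solve_alt n
instance (n : Int) (out : Int) : Decidable (Spec_solve n out) := by unfold Spec_solve; infer_instance

-- ===== CLAIM (what is proved, stated in full; the proofs are below) =====
def Claim_equal_solve : Prop := ∀ (n : Int), Dom_solve n → Pre_solve n → Spec_solve n (solve n)

-- ===== LEMMAS AND PROOFS =====
def cm (X : Int × Int × Int × Int) : Matrix (Fin 2) (Fin 2) (ZMod 1000000007) :=
  !![(X.1 : ZMod 1000000007), (X.2.1 : ZMod 1000000007);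
     (X.2.2.1 : ZMod 1000000007), (X.2.2.2 : ZMod 1000000007)]

theorem castEmod (x : Int) :
    ((x % 1000000007 : Int) : ZMod 1000000007) = (x : ZMod 1000000007) := by
  rw [Int.emod_def]
  push_cast
  have h : ((1000000007 : ℕ) : ZMod 1000000007) = 0 := ZMod.natCast_self 1000000007
  norm_num at h
  rw [h]; ring

theorem castMod (x : Int) :
    ((PySem.Int.mod x 1000000007 : Int) : ZMod 1000000007) = (x : ZMod 1000000007) := by
  rw [PySem.Int.mod_eq_emod_of_pos (by norm_num)]
  exact castEmod x

theorem cm_mul (X Y : Int × Int × Int × Int) : cm (mulM X Y) = cm X * cm Y := by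
  unfold cm mulM
  ext i j
  fin_cases i <;> fin_cases j <;>
    simp [Matrix.mul_apply, Fin.sum_univ_two, castEmod]

theorem powLoop_cm (e : Nat) (r p : Int × Int × Int × Int) :
    cm (powLoop e r p) = cm r * (cm p) ^ e := by
  induction e using Nat.strong_induction_on generalizing r p with
  | _ e ih =>
    rw [powLoop]
    by_cases h0 : e = 0
    · simp [h0]
    · rw [if_neg h0, ih (e / 2) (by omega), cm_mul]
      by_cases h1 : e % 2 = 1
      · rw [if_pos h1, cm_mul, ← pow_two, ← pow_mul, mul_assoc, ← pow_succ']
        have he : 2 * (e / 2) + 1 = e := by omega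
        rw [he]
      · rw [if_neg h1, ← pow_two, ← pow_mul]
        have he : 2 * (e / 2) = e := by omega
        rw [he]


def fA : Nat → Int × Int
  | 0 => (1, 1)
  | k + 1 =>
    (PySem.Int.mod ((fA k).1 * 4 + (fA k).2) 1000000007,
     PySem.Int.mod ((fA k).1 + (fA k).2 * 2) 1000000007)

def Pm : Matrix (Fin 2) (Fin 2) (ZMod 1000000007) := cm (4, 1, 1, 2)

theorem Pm_entries :
    Pm 0 0 = 4 ∧ Pm 0 1 = 1 ∧ Pm 1 0 = 1 ∧ Pm 1 1 = 2 := by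
  refine ⟨?_, ?_, ?_, ?_⟩ <;> (simp only [Pm, cm]; norm_num)

theorem fA_cast (k : Nat) :
    (((fA k).1 : ZMod 1000000007) = (Pm ^ k) 0 0 + (Pm ^ k) 0 1) ∧
    (((fA k).2 : ZMod 1000000007) = (Pm ^ k) 1 0 + (Pm ^ k) 1 1) := by
  obtain ⟨e00, e01, e10, e11⟩ := Pm_entries
  induction k with
  | zero => simp [fA]
  | succ k ih =>
    obtain ⟨ih1, ih2⟩ := ih
    rw [pow_succ']
    constructor <;>
      (simp only [fA, Matrix.mul_apply, Fin.sum_univ_two, e00, e01, e10, e11, castMod]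
       push_cast
       rw [ih1, ih2]
       ring)

theorem cm_id : cm (1, 0, 0, 1) = 1 := by
  simp only [cm, Matrix.one_fin_two]
  norm_num

theorem cm_entries (X : Int × Int × Int × Int) :
    cm X 0 0 = (X.1 : ZMod 1000000007) ∧ cm X 0 1 = (X.2.1 : ZMod 1000000007) ∧
    cm X 1 0 = (X.2.2.1 : ZMod 1000000007) ∧ cm X 1 1 = (X.2.2.2 : ZMod 1000000007) := by
  refine ⟨?_, ?_, ?_, ?_⟩ <;> simp [cm]

theorem mod_eq_of_cast (a b : Int)
    (h : (a : ZMod 1000000007) = (b : ZMod 1000000007)) :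
    PySem.Int.mod a 1000000007 = PySem.Int.mod b 1000000007 := by
  rw [PySem.Int.mod_eq_emod_of_pos (by norm_num), PySem.Int.mod_eq_emod_of_pos (by norm_num)]
  have hm := (ZMod.intCast_eq_intCast_iff a b 1000000007).1 h
  unfold Int.ModEq at hm
  push_cast at hm
  exact hm

theorem B_cast (e : Nat) :
    (((powLoop e (1, 0, 0, 1) (4, 1, 1, 2)).1 + (powLoop e (1, 0, 0, 1) (4, 1, 1, 2)).2.1
      + (powLoop e (1, 0, 0, 1) (4, 1, 1, 2)).2.2.1 + (powLoop e (1, 0, 0, 1) (4, 1, 1, 2)).2.2.2 : Int)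
      : ZMod 1000000007)
      = (Pm ^ e) 0 0 + (Pm ^ e) 0 1 + (Pm ^ e) 1 0 + (Pm ^ e) 1 1 := by
  have h := powLoop_cm e (1, 0, 0, 1) (4, 1, 1, 2)
  rw [cm_id, one_mul] at h
  obtain ⟨c00, c01, c10, c11⟩ := cm_entries (powLoop e (1, 0, 0, 1) (4, 1, 1, 2))
  have h00 := congrArg (fun m => m 0 0) h
  have h01 := congrArg (fun m => m 0 1) h
  have h10 := congrArg (fun m => m 1 0) h
  have h11 := congrArg (fun m => m 1 1) h
  simp only at h00 h01 h10 h11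
  rw [c00] at h00; rw [c01] at h01; rw [c10] at h10; rw [c11] at h11
  push_cast
  rw [h00, h01, h10, h11]
  rfl
def dpInit (N : Nat) : List (Int × Int) := (List.replicate (N + 2) ((0:Int), (0:Int))).set 1 (1, 1)

theorem A_fold (N : Nat) : ∀ k, 1 ≤ k → k ≤ N →
    ((PySem.List.pyRange 2 ((k:Int) + 1) 1).foldl solveStep (dpInit N)).length = N + 2 ∧
    ((PySem.List.pyRange 2 ((k:Int) + 1) 1).foldl solveStep (dpInit N)).getD k ((0:Int), (0:Int)) = fA (k - 1) := by
  intro k hk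
  induction k, hk using Nat.le_induction with
  | base =>
    intro _
    rw [PySem.List.pyRange_one_eq_nil (by norm_num)]
    refine ⟨by simp [dpInit], ?_⟩
    simp [dpInit, fA, List.getD]
  | succ k hk ih =>
    intro hkN
    obtain ⟨hlen, hget⟩ := ih (by omega)
    have hr : PySem.List.pyRange 2 (((k+1:Nat):Int) + 1) 1
        = PySem.List.pyRange 2 ((k:Int) + 1) 1 ++ [(k:Int) + 1] := by
      rw [show (((k+1:Nat):Int) + 1) = ((k:Int) + 1) + 1 by push_cast; ring]
      exact PySem.List.pyRange_one_succ_right (by omega)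
    rw [hr, List.foldl_append]
    set dpk := (PySem.List.pyRange 2 ((k:Int) + 1) 1).foldl solveStep (dpInit N) with hdpk
    simp only [List.foldl_cons, List.foldl_nil]
    unfold solveStep
    rw [show ((k:Int) + 1 - 1) = ((k:Nat):Int) by ring]
    rw [PySem.List.pyGetD_natCast]
    rw [hget]
    rw [show ((k:Int) + 1) = (((k+1:Nat)):Int) by push_cast; ring, PySem.List.pySetD_natCast]
    have hlt : k + 1 < dpk.length := by omega
    refine ⟨by simp [hlen], ?_⟩
    simp only [List.getD, List.getElem?_set_self, hlt, Option.getD_some]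
    rw [show k + 1 - 1 = (k - 1) + 1 by omega, fA]

theorem A_eval (N : Nat) (h : 1 ≤ N) :
    solve ((N:Nat) : Int) = PySem.Int.mod ((fA (N - 1)).1 + (fA (N - 1)).2) 1000000007 := by
  have hdp0 : (PySem.List.pyRange 0 ((N:Int) + 2) 1).map (fun _ => ((0:Int), (0:Int)))
      = List.replicate (N + 2) ((0:Int), (0:Int)) := by
    rw [PySem.List.pyRange_one]
    simp only [List.map_map, Function.comp_def]
    rw [List.map_const', List.length_range,
      show ((N:Int) + 2 - 0).toNat = N + 2 by omega]
  have hset : PySem.List.pySet? (List.replicate (N + 2) ((0:Int), (0:Int))) 1 ((1:Int), (1:Int))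
      = some (dpInit N) := by
    have h := PySem.List.pySet?_natCast (List.replicate (N + 2) ((0:Int), (0:Int))) 1
      ((1:Int), (1:Int)) (by simp)
    norm_num at h
    exact h
  obtain ⟨hlen, hget⟩ := A_fold N N h le_rfl
  simp only [solve, hdp0, hset]
  rw [PySem.List.pyGetD_natCast, hget]

theorem main_eq (N : Nat) (h : 1 ≤ N) : solve ((N:Nat) : Int) = solve_alt ((N:Nat) : Int) := by
  rw [A_eval N h]
  unfold solve_alt
  rw [if_neg (by omega)]
  rw [show (((N:Nat):Int) - 1).toNat = N - 1 by omega]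
  apply mod_eq_of_cast
  have ⟨h1, h2⟩ := fA_cast (N - 1)
  have hb := B_cast (N - 1)
  push_cast at hb ⊢
  rw [h1, h2]
  linear_combination -hb


-- ===== VERDICT (by name: the statement is the Claim_ definition above) =====
theorem solve_spec : Claim_equal_solve := by
  intro n _ hpre
  unfold Pre_solve at hpre
  unfold Spec_solve
  have hn : n = ((n.toNat : Nat) : Int) := (Int.toNat_of_nonneg hpre).symm
  rcases Nat.eq_zero_or_pos n.toNat with h0 | h1
  · rw [hn, h0]; decide
  · rw [hn]; exact main_eq n.toNat h1
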